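-- pv_equiv track=rewrite | github.com/SZNASKME/AutomateDEV | Stonebranch/JIL/ConvertToExcel/JILToExcel.py | extcelParseData
-- ===== SOURCE A (Python) =====
-- def extcelParseData(lines):
--     data = []
--     current_entry = {}
--     for line in lines:
--         line = line.strip()
--         if not line:
--             continue  # Skip empty lines
--         key, value = line.split(':')
--         key = key.strip()
--         value = value.strip()
--         if key == 'extended_calendar':
--             if current_entry:
--                 data.append(current_entry)
--             current_entry = {'extended_calendar': value}
--         else:
--             current_entry[key] = value
--     if current_entry:
--         data.append(current_entry)
--     return data
-- ===== SOURCE B (Python) =====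
-- def extcelParseData(lines):
--     # parse phase: strip, skip empties, split into (key, value) pairs
--     pairs = []
--     for line in lines:
--         line = line.strip()
--         if line:
--             key, value = line.split(':')
--             pairs.append((key.strip(), value.strip()))
--     # grouping phase: cut the flat pair list into segments at 'extended_calendar' markers
--     segments = []
--     for pair in pairs:
--         if pair[0] == 'extended_calendar' or not segments:
--             segments.append([pair])
--         else:
--             segments[-1].append(pair)
--     # each segment becomes one entry dict (dict() keeps first position, last value)
--     return [dict(seg) for seg in segments]
-- ===== Notes on version B (the rewrite author's own statement) =====
-- stated objective: alternative
-- what changed: B replaces A's single interleaved loop with a dict accumulator and emptiness checks by three phases: parse lines to a flat (key,value) list, cut that list into segments at 'extended_calendar' markers (no dicts, no emptiness tests in the loop), then turn each segment into a dict at the end.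
import Mathlib
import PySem

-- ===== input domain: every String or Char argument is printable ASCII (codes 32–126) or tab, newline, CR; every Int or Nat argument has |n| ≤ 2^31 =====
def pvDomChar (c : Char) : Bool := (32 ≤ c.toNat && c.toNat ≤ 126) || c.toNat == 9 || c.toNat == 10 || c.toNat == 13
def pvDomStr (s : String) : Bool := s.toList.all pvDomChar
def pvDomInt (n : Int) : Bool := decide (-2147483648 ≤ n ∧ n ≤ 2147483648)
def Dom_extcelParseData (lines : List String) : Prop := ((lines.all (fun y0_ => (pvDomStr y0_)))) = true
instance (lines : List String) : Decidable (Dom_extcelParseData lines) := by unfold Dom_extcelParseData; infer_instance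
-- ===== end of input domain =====

-- B changes the decomposition (parse / cut into segments / dict each segment) instead of A's
-- single loop with a dict accumulator; equivalence of return values is proved on Pre_ (no side effects).

-- ===== PORT A =====
-- A: one loop carrying (data, current_entry); on a malformed line (split(':') ≠ 2 parts)
-- Python raises ValueError — excluded by Pre_; the port leaves the state unchanged there.
def extcelParseData (lines : List String) : List (List (String × String)) :=
  let st := lines.foldl
    (fun (st : List (PySem.Dict String String) × PySem.Dict String String) line =>
      let line := PySem.Str.strip line
      if line = "" then st
      else
        match PySem.Str.split? line ":" with
        | some [k, v] =>
          let key := PySem.Str.strip k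
          let value := PySem.Str.strip v
          if key = "extended_calendar" then
            ((if st.2.items.isEmpty then st.1 else st.1 ++ [st.2]),
             PySem.Dict.empty.insert "extended_calendar" value)
          else (st.1, st.2.insert key value)
        | _ => st)  -- ValueError in Python; outside Pre_
    ([], PySem.Dict.empty)
  (if st.2.items.isEmpty then st.1 else st.1 ++ [st.2]).map (fun d => d.items)

-- ===== PORT B =====
def extcelParseData_alt (lines : List String) : List (List (String × String)) :=
  let pairs := lines.foldl
    (fun (acc : List (String × String)) line =>
      let line := PySem.Str.strip line
      if line = "" then acc
      else
        let parts := (PySem.Str.split? line ":").getD []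
        if parts.length = 2 then
          acc ++ [(PySem.Str.strip (parts.getD 0 ""), PySem.Str.strip (parts.getD 1 ""))]
        else acc)  -- ValueError in Python; outside Pre_
    []
  let segments := pairs.foldl
    (fun (segs : List (List (String × String))) pair =>
      if pair.1 = "extended_calendar" ∨ segs.isEmpty then segs ++ [[pair]]
      else segs.dropLast ++ [segs.getLastD [] ++ [pair]])
    []
  segments.map (fun seg => (PySem.Dict.ofList seg).items)

-- ===== PRECONDITION & SPEC =====
-- Pre_ excludes exactly the inputs on which Python A raises ValueError: some stripped
-- non-empty line does not split on ':' into exactly two parts.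
def Pre_extcelParseData (lines : List String) : Prop :=
  ∀ line ∈ lines, PySem.Str.strip line ≠ "" →
    ((PySem.Str.split? (PySem.Str.strip line) ":").getD []).length = 2
instance (lines : List String) : Decidable (Pre_extcelParseData lines) := by
  unfold Pre_extcelParseData; infer_instance
def pvWitness_extcelParseData : List String :=
  ["extended_calendar: CAL1", " days : 5 ", "", "extended_calendar:CAL2"]
def Spec_extcelParseData (lines : List String) (out : List (List (String × String))) : Prop := out = extcelParseData_alt lines
instance (lines : List String) (out : List (List (String × String))) : Decidable (Spec_extcelParseData lines out) := by unfold Spec_extcelParseData; infer_instance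

-- ===== CLAIM (what is proved, stated in full; the proofs are below) =====
def Claim_equal_extcelParseData : Prop := ∀ (lines : List String), Dom_extcelParseData lines → Pre_extcelParseData lines → Spec_extcelParseData lines (extcelParseData lines)

-- ===== LEMMAS AND PROOFS =====

-- what one line contributes to the flat pair list (0 or 1 pairs)
def pvPline (line : String) : List (String × String) :=
  let s := PySem.Str.strip line
  if s = "" then []
  else
    match PySem.Str.split? s ":" with
    | some [k, v] => [(PySem.Str.strip k, PySem.Str.strip v)]
    | _ => []

-- A's step factored over pairs
def pvGroupA (st : List (PySem.Dict String String) × PySem.Dict String String)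
    (p : String × String) : List (PySem.Dict String String) × PySem.Dict String String :=
  if p.1 = "extended_calendar" then
    ((if st.2.items.isEmpty then st.1 else st.1 ++ [st.2]),
     PySem.Dict.empty.insert "extended_calendar" p.2)
  else (st.1, st.2.insert p.1 p.2)

-- B's grouping step
def pvGroupB (segs : List (List (String × String))) (p : String × String) :
    List (List (String × String)) :=
  if p.1 = "extended_calendar" ∨ segs.isEmpty then segs ++ [[p]]
  else segs.dropLast ++ [segs.getLastD [] ++ [p]]

theorem pvA_fusion (lines : List String)
    (st : List (PySem.Dict String String) × PySem.Dict String String) :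
    lines.foldl
      (fun st line =>
        let line := PySem.Str.strip line
        if line = "" then st
        else
          match PySem.Str.split? line ":" with
          | some [k, v] =>
            let key := PySem.Str.strip k
            let value := PySem.Str.strip v
            if key = "extended_calendar" then
              ((if st.2.items.isEmpty then st.1 else st.1 ++ [st.2]),
               PySem.Dict.empty.insert "extended_calendar" value)
            else (st.1, st.2.insert key value)
          | _ => st) st
    = (lines.flatMap pvPline).foldl pvGroupA st := by
  induction lines generalizing st with
  | nil => rfl
  | cons l rest ih =>
    simp only [List.foldl_cons, List.flatMap_cons, List.foldl_append]
    rw [ih]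
    congr 1
    simp only [pvPline]
    by_cases h : PySem.Str.strip l = ""
    · simp [h]
    · simp only [h, if_false]
      cases hsp : PySem.Str.split? (PySem.Str.strip l) ":" with
      | none => simp
      | some parts =>
        match parts with
        | [] => simp
        | [k] => simp
        | [k, v] => simp [pvGroupA]
        | k :: v :: w :: t => simp

theorem pvB_pairs (lines : List String) (acc : List (String × String)) :
    lines.foldl
      (fun acc line =>
        let line := PySem.Str.strip line
        if line = "" then acc
        else
          let parts := (PySem.Str.split? line ":").getD []
          if parts.length = 2 then
            acc ++ [(PySem.Str.strip (parts.getD 0 ""), PySem.Str.strip (parts.getD 1 ""))]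
          else acc) acc
    = acc ++ lines.flatMap pvPline := by
  induction lines generalizing acc with
  | nil => simp
  | cons l rest ih =>
    simp only [List.foldl_cons, List.flatMap_cons]
    rw [ih]
    simp only [pvPline]
    by_cases h : PySem.Str.strip l = ""
    · simp [h]
    · simp only [h, if_false]
      cases hsp : PySem.Str.split? (PySem.Str.strip l) ":" with
      | none => simp
      | some parts =>
        match parts with
        | [] => simp
        | [k] => simp
        | [k, v] => simp
        | k :: v :: w :: t => simp

theorem pv_insert_items_ne_nil {κ ν : Type} [BEq κ] (d : PySem.Dict κ ν) (k : κ) (v : ν) :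
    (d.insert k v).items ≠ [] := by
  rw [PySem.Dict.items_insert]
  split_ifs with h
  · intro hc
    have hnil : d.items = [] := List.map_eq_nil_iff.mp hc
    simp [PySem.Dict.contains, hnil] at h
  · simp

theorem pv_update_items_ne_nil {κ ν : Type} [BEq κ] (l : List (κ × ν)) (d : PySem.Dict κ ν)
    (h : d.items ≠ []) : (PySem.Dict.update d l).items ≠ [] := by
  induction l generalizing d with
  | nil => exact h
  | cons p t ih =>
    simp only [PySem.Dict.update, List.foldl_cons] at *
    exact ih _ (pv_insert_items_ne_nil _ _ _)

theorem pv_ofList_ne_nil {κ ν : Type} [BEq κ] (p : κ × ν) (t : List (κ × ν)) :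
    (PySem.Dict.ofList (p :: t)).items ≠ [] := by
  simp only [PySem.Dict.ofList, PySem.Dict.update, List.foldl_cons]
  exact pv_update_items_ne_nil t _ (pv_insert_items_ne_nil _ _ _)

theorem pv_ofList_append_singleton {κ ν : Type} [BEq κ] (l : List (κ × ν)) (p : κ × ν) :
    PySem.Dict.ofList (l ++ [p]) = (PySem.Dict.ofList l).insert p.1 p.2 := by
  simp [PySem.Dict.ofList, PySem.Dict.update, List.foldl_append]

-- invariant linking A's (data, current_entry) to B's segment list
def pvRel (st : List (PySem.Dict String String) × PySem.Dict String String)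
    (segs : List (List (String × String))) : Prop :=
  (segs = [] ∧ st.1 = [] ∧ st.2 = PySem.Dict.empty) ∨
  (segs ≠ [] ∧ segs.getLastD [] ≠ [] ∧
   st.1 = segs.dropLast.map PySem.Dict.ofList ∧ st.2 = PySem.Dict.ofList (segs.getLastD []))

theorem pvRel_step (st : List (PySem.Dict String String) × PySem.Dict String String)
    (segs : List (List (String × String))) (p : String × String) (h : pvRel st segs) :
    pvRel (pvGroupA st p) (pvGroupB segs p) := by
  rcases h with ⟨hs, hd, hc⟩ | ⟨hs, hlast, hd, hc⟩
  · -- empty state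
    subst hs
    right
    simp only [pvGroupA, pvGroupB, hd, hc]
    by_cases hk : p.1 = "extended_calendar" <;>
      simp [hk, PySem.Dict.ofList, PySem.Dict.update, PySem.Dict.empty]
  · -- non-empty: segs = init ++ [last], last ≠ []
    obtain ⟨init, last, rfl⟩ : ∃ i l, segs = i ++ [l] := by
      rcases List.eq_nil_or_concat segs with h | ⟨i, l, h⟩
      · exact absurd h hs
      · exact ⟨i, l, by simpa using h⟩
    simp only [List.getLastD_concat, List.dropLast_concat] at hd hc hlast
    have hne : (PySem.Dict.ofList last).items ≠ [] := by
      cases hl : last with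
      | nil => exact absurd hl hlast
      | cons a t => exact pv_ofList_ne_nil a t
    right
    by_cases hk : p.1 = "extended_calendar"
    · -- new segment
      simp only [pvGroupA, pvGroupB, hk, true_or, if_true]
      refine ⟨by simp, by simp, ?_, ?_⟩
      · simp [hd, hc, hne]
      · have : PySem.Dict.ofList [p] = PySem.Dict.empty.insert p.1 p.2 := by
          simp [PySem.Dict.ofList, PySem.Dict.update]
        simp [← hk, this]
    · -- extend last segment
      have hnb : ¬ (p.1 = "extended_calendar" ∨ (init ++ [last]).isEmpty = true) := by
        simp [hk]
      simp only [pvGroupA, pvGroupB, if_neg hk, if_neg hnb, List.dropLast_concat,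
        List.getLastD_concat]
      refine ⟨by simp, by simp [hlast], ?_, ?_⟩
      · simp [hd]
      · simp [hc, pv_ofList_append_singleton]

theorem pvRel_fold (pairs : List (String × String))
    (st : List (PySem.Dict String String) × PySem.Dict String String)
    (segs : List (List (String × String))) (h : pvRel st segs) :
    pvRel (pairs.foldl pvGroupA st) (pairs.foldl pvGroupB segs) := by
  induction pairs generalizing st segs with
  | nil => exact h
  | cons p t ih => exact ih _ _ (pvRel_step st segs p h)

theorem pvRel_final (st : List (PySem.Dict String String) × PySem.Dict String String)
    (segs : List (List (String × String))) (h : pvRel st segs) :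
    ((if st.2.items.isEmpty then st.1 else st.1 ++ [st.2]).map (fun d => d.items))
      = segs.map (fun seg => (PySem.Dict.ofList seg).items) := by
  rcases h with ⟨hs, hd, hc⟩ | ⟨hs, hlast, hd, hc⟩
  · simp [hs, hd, hc, PySem.Dict.empty]
  · obtain ⟨init, last, rfl⟩ : ∃ i l, segs = i ++ [l] := by
      rcases List.eq_nil_or_concat segs with h | ⟨i, l, h⟩
      · exact absurd h hs
      · exact ⟨i, l, by simpa using h⟩
    simp only [List.getLastD_concat, List.dropLast_concat] at hd hc hlast
    have hne : (PySem.Dict.ofList last).items ≠ [] := by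
      cases hl : last with
      | nil => exact absurd hl hlast
      | cons a t => exact pv_ofList_ne_nil a t
    simp [hd, hc, hne]

-- ===== VERDICT (by name: the statement is the Claim_ definition above) =====
theorem extcelParseData_spec : Claim_equal_extcelParseData := by
  intro lines _ _
  show extcelParseData lines = extcelParseData_alt lines
  unfold extcelParseData extcelParseData_alt
  rw [pvA_fusion, pvB_pairs]
  simp only [List.nil_append]
  exact pvRel_final _ _ (pvRel_fold _ _ _ (Or.inl ⟨rfl, rfl, rfl⟩))
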